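-- pv_equiv track=rewrite | github.com/diegoforni/Algoritmos2 | practicas/tp-ada/code/divide.py | kElemMediana
-- ===== SOURCE A (Python) =====
-- def quickSelect(lista, k):
--     if len(lista) == 1:
--         return lista[0]
--     pivot = lista[len(lista) // 2]
--     menores = [x for x in lista if x < pivot]
--     mayores = [x for x in lista if x > pivot]
--     pivots = [x for x in lista if x == pivot]
--
--     if k < len(menores):
--         return quickSelect(menores, k)
--     elif k < len(menores) + len(pivots):
--         return pivot
--     else:
--         return quickSelect(mayores, k - len(menores) - len(pivots))
--
-- def kElemMediana(S, k):
--     if not S or k < 0 or k >= len(S):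
--         return None
--
--     # Find the median
--     mediana = quickSelect(S, len(S) // 2)
--
--     # Calculate the absolute differences from the median
--     diff = [abs(x - mediana) for x in S]
--
--     # Find the k-th smallest difference
--     kth_diff = quickSelect(diff, k)
--
--     # Find the elements with the k closest differences
--     closest_k_elements = [x for x in S if abs(x - mediana) <= kth_diff]
--
--     # Sort the closest elements to get exactly k elements
--     closest_k_elements.sort(key=lambda x: abs(x - mediana))
--
--     return closest_k_elements[:k]
-- ===== SOURCE B (Python) =====
-- def kElemMediana(S, k):
--     if not S or k < 0 or k >= len(S):
--         return None
--     mediana = sorted(S)[len(S) // 2]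
--     return sorted(S, key=lambda x: abs(x - mediana))[:k]
-- ===== Notes on version B (the rewrite author's own statement) =====
-- stated objective: simpler
-- what changed: Dropped the recursive quickSelect helper and the filter-then-sort pipeline: B computes the median with one plain sort and returns the first k elements of S stably sorted by absolute distance to the median.
import Mathlib
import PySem

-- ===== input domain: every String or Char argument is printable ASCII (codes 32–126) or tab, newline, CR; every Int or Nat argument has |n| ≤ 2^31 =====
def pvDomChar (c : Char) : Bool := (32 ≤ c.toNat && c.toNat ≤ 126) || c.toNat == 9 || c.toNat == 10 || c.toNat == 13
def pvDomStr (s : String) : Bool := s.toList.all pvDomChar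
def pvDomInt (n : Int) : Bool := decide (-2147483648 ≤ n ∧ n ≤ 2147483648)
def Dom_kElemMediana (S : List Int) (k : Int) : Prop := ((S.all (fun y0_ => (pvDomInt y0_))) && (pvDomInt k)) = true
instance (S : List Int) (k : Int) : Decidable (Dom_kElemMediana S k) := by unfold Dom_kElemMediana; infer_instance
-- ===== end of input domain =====

-- B drops the recursive quickSelect passes and the filter-then-sort pipeline: one plain sort
-- gives the median and one stable sort by distance to it gives the answer; equal return value proved on all inputs.

-- ===== PORT A =====
def compLt (lista : List Int) (pivot : Int) : List Int := lista.filter (fun x => decide (x < pivot))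
def compGt (lista : List Int) (pivot : Int) : List Int := lista.filter (fun x => decide (pivot < x))
def compEq (lista : List Int) (pivot : Int) : List Int := lista.filter (fun x => x == pivot)


def quickSelect (lista : List Int) (k : Int) : Option Int :=
  if lista.length = 1 then PySem.List.pyGet? lista 0
  else
    match h : PySem.List.pyGet? lista (PySem.Int.floordiv (lista.length : Int) 2) with
    | none => none
    | some pivot =>
      let menores := compLt lista pivot
      let mayores := compGt lista pivot
      let pivots := compEq lista pivot
      if k < (menores.length : Int) then quickSelect menores k
      else if k < (menores.length : Int) + (pivots.length : Int) then some pivot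
      else quickSelect mayores (k - (menores.length : Int) - (pivots.length : Int))
termination_by lista.length
decreasing_by
  · have hm : pivot ∈ lista := PySem.List.mem_of_pyGet?_eq_some lista h
    exact List.length_filter_lt_length_iff_exists.mpr ⟨pivot, hm, by simp⟩
  · have hm : pivot ∈ lista := PySem.List.mem_of_pyGet?_eq_some lista h
    exact List.length_filter_lt_length_iff_exists.mpr ⟨pivot, hm, by simp⟩

def kElemMediana (S : List Int) (k : Int) : Option (List Int) :=
  if S.length = 0 ∨ k < 0 ∨ (S.length : Int) ≤ k then none
  else
    match quickSelect S (PySem.Int.floordiv (S.length : Int) 2) with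
    | none => none
    | some mediana =>
      let diff := S.map (fun x => |x - mediana|)
      match quickSelect diff k with
      | none => none
      | some kth =>
        let closest := S.filter (fun x => decide (|x - mediana| ≤ kth))
        some (PySem.List.slice (PySem.List.sorted closest (fun x => |x - mediana|) false)
          none (some k))


-- ===== PORT B =====
def kElemMediana_alt (S : List Int) (k : Int) : Option (List Int) :=
  if S.length = 0 ∨ k < 0 ∨ (S.length : Int) ≤ k then none
  else
    let mediana := PySem.List.pyGetD (PySem.List.sorted S (fun x => x) false)
        (PySem.Int.floordiv (S.length : Int) 2) 0
    some (PySem.List.slice (PySem.List.sorted S (fun x => |x - mediana|) false) none (some k))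


-- ===== PRECONDITION & SPEC =====
def Spec_kElemMediana (S : List Int) (k : Int) (out : Option (List Int)) : Prop := out = kElemMediana_alt S k
instance (S : List Int) (k : Int) (out : Option (List Int)) : Decidable (Spec_kElemMediana S k out) := by unfold Spec_kElemMediana; infer_instance

-- ===== CLAIM (what is proved, stated in full; the proofs are below) =====
def Claim_equal_kElemMediana : Prop := ∀ (S : List Int) (k : Int), Dom_kElemMediana S k → Spec_kElemMediana S k (kElemMediana S k)

-- ===== LEMMAS AND PROOFS =====
theorem insertBy_of_forall_before (before : Int → Int → Bool) (x : Int) (ys : List Int)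
    (h : ∀ y ∈ ys, before x y = true) :
    PySem.List.insertBy before x ys = x :: ys := by
  cases ys with
  | nil => rfl
  | cons y ys => simp [PySem.List.insertBy, h y (List.mem_cons_self)]

theorem pairwise_insertBy (key : Int → Int) (x : Int) (ys : List Int)
    (hs : ys.Pairwise (fun a b => key a ≤ key b)) :
    (PySem.List.insertBy (fun a b => decide (key a < key b)) x ys).Pairwise
      (fun a b => key a ≤ key b) := by
  induction ys with
  | nil => simp [PySem.List.insertBy]
  | cons y ys ih =>
    rcases List.pairwise_cons.mp hs with ⟨hy, hys⟩
    by_cases h : key x < key y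
    · simp only [PySem.List.insertBy, h, decide_true, if_true]
      refine List.pairwise_cons.mpr ⟨?_, hs⟩
      intro z hz
      rcases List.mem_cons.mp hz with rfl | hz
      · exact le_of_lt h
      · exact le_of_lt (lt_of_lt_of_le h (hy z hz))
    · simp only [PySem.List.insertBy, h, decide_false, Bool.false_eq_true, if_false]
      refine List.pairwise_cons.mpr ⟨?_, ih hys⟩
      intro z hz
      rcases (PySem.List.mem_insertBy _ x z ys).mp hz with rfl | hz
      · exact le_of_not_gt h
      · exact hy z hz

theorem filter_insertBy (key : Int → Int) (p : Int → Bool) (x : Int) (ys : List Int)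
    (hs : ys.Pairwise (fun a b => key a ≤ key b)) :
    (PySem.List.insertBy (fun a b => decide (key a < key b)) x ys).filter p =
      if p x then PySem.List.insertBy (fun a b => decide (key a < key b)) x (ys.filter p)
      else ys.filter p := by
  induction ys with
  | nil => cases hpx : p x <;> simp [PySem.List.insertBy, hpx]
  | cons y ys ih =>
    rcases List.pairwise_cons.mp hs with ⟨hy, hys⟩
    by_cases h : key x < key y
    · simp only [PySem.List.insertBy, h, decide_true, if_true]
      cases hpx : p x with
      | false => simp [List.filter_cons, hpx]
      | true =>
        have hall : ∀ z ∈ (y :: ys).filter p, decide (key x < key z) = true := by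
          intro z hz
          rcases List.mem_cons.mp (List.mem_of_mem_filter hz) with rfl | hz
          · simpa using h
          · simpa using lt_of_lt_of_le h (hy z hz)
        rw [insertBy_of_forall_before _ _ _ hall]
        simp [List.filter_cons, hpx]
    · simp only [PySem.List.insertBy, h, decide_false, Bool.false_eq_true, if_false]
      rw [List.filter_cons, List.filter_cons]
      cases hpy : p y with
      | false => simpa [hpy] using ih hys
      | true =>
        simp only [if_true]
        cases hpx : p x with
        | false => simpa [hpx] using ih hys
        | true =>
          have : PySem.List.insertBy (fun a b => decide (key a < key b)) x (y :: ys.filter p)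
              = y :: PySem.List.insertBy (fun a b => decide (key a < key b)) x (ys.filter p) := by
            simp [PySem.List.insertBy, h]
          rw [this]
          simpa [hpx] using congrArg (List.cons y) (ih hys)

theorem foldl_insert_filter (key : Int → Int) (p : Int → Bool) :
    ∀ (xs acc : List Int), acc.Pairwise (fun a b => key a ≤ key b) →
    (xs.foldl (fun acc x => PySem.List.insertBy (fun a b => decide (key a < key b)) x acc) acc).filter p
      = (xs.filter p).foldl (fun acc x => PySem.List.insertBy (fun a b => decide (key a < key b)) x acc) (acc.filter p) := by
  intro xs
  induction xs with
  | nil => intro acc _; rfl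
  | cons x xs ih =>
    intro acc hacc
    have h1 := ih _ (pairwise_insertBy key x acc hacc)
    rw [List.foldl_cons, h1, filter_insertBy key p x acc hacc, List.filter_cons]
    cases hpx : p x <;> simp

theorem sorted_filter_comm (S : List Int) (key : Int → Int) (p : Int → Bool) :
    PySem.List.sorted (S.filter p) key false = (PySem.List.sorted S key false).filter p := by
  rw [PySem.List.sorted_eq_foldl_insertBy, PySem.List.sorted_eq_foldl_insertBy,
    foldl_insert_filter key p S [] (by simp)]
  rfl

theorem sorted_map_key (S : List Int) (key : Int → Int) :
    PySem.List.sorted (S.map key) (fun x => x) false =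
      (PySem.List.sorted S key false).map key := by
  refine List.Perm.eq_of_pairwise (le := fun a b => a ≤ b)
    (fun a b _ _ h1 h2 => le_antisymm h1 h2)
    (PySem.List.sorted_pairwise (S.map key) (fun x => x))
    (List.pairwise_map.mpr (PySem.List.sorted_pairwise S key)) ?_
  exact (PySem.List.sorted_perm (S.map key) (fun x => x) false).trans
      ((PySem.List.sorted_perm S key false).map key).symm

-- [x for x in lista if x < pivot], [x for x in lista if x > pivot], [x for x in lista if x == pivot]
-- three-way partition permutation
theorem perm_partition3 (lista : List Int) (pivot : Int) :
    lista.Perm (compLt lista pivot ++ (compEq lista pivot ++ compGt lista pivot)) := by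
  simp only [compLt, compEq, compGt]
  rw [List.perm_iff_count]
  intro a
  simp only [List.count_append]
  have hz : ∀ (p : Int → Bool), p a = false → List.count a (lista.filter p) = 0 := by
    intro p hp
    refine List.count_eq_zero.mpr ?_
    simp only [List.mem_filter, not_and]
    intro _ hc
    rw [hp] at hc
    exact Bool.false_ne_true hc
  rcases lt_trichotomy a pivot with h | h | h
  · rw [List.count_filter (p := fun x => decide (x < pivot)) (by simp [h]),
      hz _ (by simp [ne_of_lt h]), hz _ (by simp [not_lt_of_gt h])]
    omega
  · subst h
    rw [List.count_filter (p := fun x => x == a) (by simp),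
      hz (fun x => decide (x < a)) (by simp), hz (fun x => decide (a < x)) (by simp)]
    omega
  · rw [List.count_filter (p := fun x => decide (pivot < x)) (by simp [h]),
      hz _ (by simp [not_lt_of_gt h]), hz _ (by simp [ne_of_gt h])]
    omega

theorem sorted_partition3 (lista : List Int) (pivot : Int) :
    PySem.List.sorted lista (fun x => x) false =
      PySem.List.sorted (compLt lista pivot) (fun x => x) false ++
      (compEq lista pivot ++
       PySem.List.sorted (compGt lista pivot) (fun x => x) false) := by
  simp only [compLt, compEq, compGt]
  refine List.Perm.eq_of_pairwise (le := fun a b => a ≤ b)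
    (fun a b _ _ h1 h2 => le_antisymm h1 h2)
    (PySem.List.sorted_pairwise lista (fun x => x)) ?_ ?_
  · rw [List.pairwise_append]
    refine ⟨PySem.List.sorted_pairwise _ _, ?_, ?_⟩
    · rw [List.pairwise_append]
      refine ⟨?_, PySem.List.sorted_pairwise _ _, ?_⟩
      · refine List.pairwise_of_forall_mem_list ?_
        intro a ha b hb
        have ha' : a = pivot := by simpa using (List.mem_filter.mp ha).2
        have hb' : b = pivot := by simpa using (List.mem_filter.mp hb).2
        simp [ha', hb']
      · intro a ha b hb
        have ha' : a = pivot := by simpa using (List.mem_filter.mp ha).2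
        have hb' : pivot < b := by
          have := (List.mem_filter.mp ((PySem.List.mem_sorted _ _ _ _).mp hb)).2
          simpa using this
        exact ha' ▸ le_of_lt hb'
    · intro a ha b hb
      have ha' : a < pivot := by
        have := (List.mem_filter.mp ((PySem.List.mem_sorted _ _ _ _).mp ha)).2
        simpa using this
      rcases List.mem_append.mp hb with hb | hb
      · have : b = pivot := by simpa using (List.mem_filter.mp hb).2
        exact this ▸ le_of_lt ha'
      · have : pivot < b := by
          have := (List.mem_filter.mp ((PySem.List.mem_sorted _ _ _ _).mp hb)).2
          simpa using this
        exact le_of_lt (ha'.trans this)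
  · refine (PySem.List.sorted_perm lista (fun x => x) false).trans
      ((perm_partition3 lista pivot).trans ?_)
    exact ((PySem.List.sorted_perm _ (fun x => x) false).symm.append
      ((List.Perm.refl _).append (PySem.List.sorted_perm _ (fun x => x) false).symm))

theorem pyGet?_inrange (xs : List Int) (i : Int) (h0 : 0 ≤ i) (h : i < (xs.length : Int)) :
    PySem.List.pyGet? xs i = some (xs.getD i.toNat 0) := by
  have hi : i.toNat < xs.length := by omega
  simp [PySem.List.pyGet?, PySem.List.pyIdx?, h0, h, List.getD_eq_getElem?_getD]

theorem getD_eq_pivot_of_compEq (lista : List Int) (pivot : Int) (i : Nat)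
    (h : i < (compEq lista pivot).length) :
    (compEq lista pivot).getD i 0 = pivot := by
  rw [List.getD_eq_getElem _ _ h]
  have := List.getElem_mem (l := compEq lista pivot) (h := h)
  have := (List.mem_filter.mp this).2
  simpa using this

theorem length_partition3 (lista : List Int) (pivot : Int) :
    lista.length = (compLt lista pivot).length + (compEq lista pivot).length + (compGt lista pivot).length := by
  have := (perm_partition3 lista pivot).length_eq
  simp only [List.length_append] at this
  omega

theorem quickSelect_correct (lista : List Int) (k : Int)
    (h0 : 0 ≤ k) (hk : k < (lista.length : Int)) :
    quickSelect lista k =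
      some ((PySem.List.sorted lista (fun x => x) false).getD k.toNat 0) := by
  induction lista, k using quickSelect.induct with
  | case1 lista k hlen =>
    match lista, hlen with
    | [x], _ =>
      have hk0 : k = 0 := by simp at hk; omega
      subst hk0
      rw [quickSelect]
      simp [PySem.List.pyGet?, PySem.List.pyIdx?, PySem.List.sorted, PySem.List.insertBy]
  | case2 lista k hlen hnone =>
    exfalso
    have hlen1 : 1 ≤ (lista.length : Int) := by omega
    have h2 := PySem.Int.floordiv_eq_ediv_of_pos (a := (lista.length : Int)) (b := 2) (by norm_num)
    rw [pyGet?_inrange lista _ (by omega) (by omega)] at hnone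
    simp at hnone
  | case3 lista k hlen pivot hpiv m hlt ih =>
    have hlt' : k < ((compLt lista pivot).length : Int) := hlt
    have ih' : 0 ≤ k → k < ((compLt lista pivot).length : Int) →
        quickSelect (compLt lista pivot) k =
          some ((PySem.List.sorted (compLt lista pivot) (fun x => x) false).getD k.toNat 0) := ih
    rw [quickSelect, if_neg hlen]
    split
    · next heq => rw [hpiv] at heq; cases heq
    next piv heq =>
    rw [hpiv] at heq; injection heq with e; subst e
    rw [if_pos hlt', ih' h0 hlt']
    rw [sorted_partition3 lista pivot]
    rw [List.getD_append _ _ _ k.toNat (by rw [PySem.List.length_sorted]; omega)]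
  | case4 lista k hlen pivot hpiv m p hge hlt =>
    have hge' : ¬ k < ((compLt lista pivot).length : Int) := hge
    have hlt' : k < ((compLt lista pivot).length : Int) + ((compEq lista pivot).length : Int) := hlt
    rw [quickSelect, if_neg hlen]
    split
    · next heq => rw [hpiv] at heq; cases heq
    next piv heq =>
    rw [hpiv] at heq; injection heq with e; subst e
    rw [if_neg hge', if_pos hlt']
    rw [sorted_partition3 lista pivot]
    rw [List.getD_append_right _ _ _ k.toNat (by rw [PySem.List.length_sorted]; omega)]
    rw [List.getD_append _ _ _ (k.toNat - (PySem.List.sorted (compLt lista pivot) (fun x => x) false).length) (by rw [PySem.List.length_sorted]; omega)]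
    rw [getD_eq_pivot_of_compEq lista pivot _ (by rw [PySem.List.length_sorted]; omega)]
  | case5 lista k hlen pivot hpiv m my p hge1 hge2 ih =>
    have hge1' : ¬ k < ((compLt lista pivot).length : Int) := hge1
    have hge2' : ¬ k < ((compLt lista pivot).length : Int) + ((compEq lista pivot).length : Int) := hge2
    have hlensum := length_partition3 lista pivot
    have ih' : 0 ≤ k - ((compLt lista pivot).length : Int) - ((compEq lista pivot).length : Int) →
        k - ((compLt lista pivot).length : Int) - ((compEq lista pivot).length : Int) < ((compGt lista pivot).length : Int) →
        quickSelect (compGt lista pivot) (k - ((compLt lista pivot).length : Int) - ((compEq lista pivot).length : Int)) =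
          some ((PySem.List.sorted (compGt lista pivot) (fun x => x) false).getD
            (k - ((compLt lista pivot).length : Int) - ((compEq lista pivot).length : Int)).toNat 0) := ih
    rw [quickSelect, if_neg hlen]
    split
    · next heq => rw [hpiv] at heq; cases heq
    next piv heq =>
    rw [hpiv] at heq; injection heq with e; subst e
    rw [if_neg hge1', if_neg hge2']
    rw [ih' (by omega) (by omega)]
    rw [sorted_partition3 lista pivot]
    rw [List.getD_append_right _ _ _ k.toNat (by rw [PySem.List.length_sorted]; omega)]
    rw [List.getD_append_right _ _ _ (k.toNat - (PySem.List.sorted (compLt lista pivot) (fun x => x) false).length) (by rw [PySem.List.length_sorted]; omega)]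
    congr 2
    rw [PySem.List.length_sorted]
    omega

theorem filter_le_eq_takeWhile (key : Int → Int) (c : Int) :
    ∀ (L : List Int), L.Pairwise (fun a b => key a ≤ key b) →
      L.filter (fun x => decide (key x ≤ c)) = L.takeWhile (fun x => decide (key x ≤ c)) := by
  intro L
  induction L with
  | nil => intro _; rfl
  | cons y l ih =>
    intro hs
    rcases List.pairwise_cons.mp hs with ⟨hy, hl⟩
    by_cases h : key y ≤ c
    · rw [List.filter_cons_of_pos (by simpa using h), List.takeWhile_cons_of_pos (by simpa using h),
        ih hl]
    · rw [List.filter_cons_of_neg (by simpa using h), List.takeWhile_cons_of_neg (by simpa using h)]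
      refine List.filter_eq_nil_iff.mpr ?_
      intro z hz
      simp only [decide_eq_true_eq]
      intro hc
      exact h ((hy z hz).trans hc)

theorem take_takeWhile (p : Int → Bool) :
    ∀ (L : List Int) (k : Nat), (∀ i (h : i < L.length), i < k → p L[i] = true) →
      (L.takeWhile p).take k = L.take k := by
  intro L
  induction L with
  | nil => intro k _; rfl
  | cons y l ih =>
    intro k hp
    cases k with
    | zero => simp
    | succ k =>
      have hy : p y = true := hp 0 (by simp) (Nat.succ_pos k)
      rw [List.takeWhile_cons_of_pos hy, List.take_succ_cons, List.take_succ_cons,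
        ih k (fun i hi hik => hp (i+1) (by simpa using hi) (by omega))]

theorem kElemMediana_eq (S : List Int) (k : Int) : kElemMediana S k = kElemMediana_alt S k := by
  rw [kElemMediana, kElemMediana_alt]
  by_cases hg : S.length = 0 ∨ k < 0 ∨ (S.length : Int) ≤ k
  · rw [if_pos hg, if_pos hg]
  · rw [if_neg hg, if_neg hg]
    simp only [not_or, not_lt, not_le] at hg
    obtain ⟨hS0, hk0, hklt⟩ := hg
    have hfd := PySem.Int.floordiv_eq_ediv_of_pos (a := (S.length : Int)) (b := 2) (by norm_num)
    have hmid0 : 0 ≤ PySem.Int.floordiv (S.length : Int) 2 := by omega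
    have hmidlt : PySem.Int.floordiv (S.length : Int) 2 < (S.length : Int) := by omega
    rw [quickSelect_correct S _ hmid0 hmidlt]
    dsimp only
    set m := (PySem.List.sorted S (fun x => x) false).getD
      (PySem.Int.floordiv (S.length : Int) 2).toNat 0 with hm
    -- B's mediana is the same value
    have hBmed : PySem.List.pyGetD (PySem.List.sorted S (fun x => x) false)
        (PySem.Int.floordiv (S.length : Int) 2) 0 = m := by
      rw [PySem.List.pyGetD_eq_getElem _ _ hmid0
        (by rw [PySem.List.length_sorted]; omega), hm,
        List.getD_eq_getElem _ _ (by rw [PySem.List.length_sorted]; omega)]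
    rw [hBmed]
    -- second quickSelect
    have hklt' : k < ((S.map (fun x => |x - m|)).length : Int) := by
      rw [List.length_map]; omega
    rw [quickSelect_correct _ k hk0 hklt']
    dsimp only
    rw [sorted_map_key S (fun x => |x - m|)]
    set L := PySem.List.sorted S (fun x => |x - m|) false with hL
    have hkL : k.toNat < L.length := by rw [hL, PySem.List.length_sorted]; omega
    have hkth : ((L.map (fun x => |x - m|)).getD k.toNat 0) = |L[k.toNat] - m| := by
      rw [List.getD_eq_getElem _ _ (by rw [List.length_map]; omega), List.getElem_map]
    rw [hkth]
    -- filter-sort commutation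
    rw [sorted_filter_comm S (fun x => |x - m|) (fun x => decide (|x - m| ≤ |L[k.toNat] - m|))]
    rw [← hL]
    -- slices are takes
    rw [PySem.List.slice_to _ hk0, PySem.List.slice_to _ hk0]
    -- sorted prefix
    rw [filter_le_eq_takeWhile (fun x => |x - m|) (|L[k.toNat] - m|) L
      (by rw [hL]; exact PySem.List.sorted_pairwise S (fun x => |x - m|))]
    rw [take_takeWhile _ L k.toNat]
    intro i hi hik
    simp only [decide_eq_true_eq]
    have := PySem.List.key_sorted_getElem_mono (xs := S) (key := fun x => |x - m|)
      (p := i) (q := k.toNat) (by omega) (by rw [PySem.List.length_sorted]; omega)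
    simpa [← hL] using this

-- ===== VERDICT (by name: the statement is the Claim_ definition above) =====
theorem kElemMediana_spec : Claim_equal_kElemMediana := fun S k _ => kElemMediana_eq S k
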